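-- pv_equiv track=rewrite | github.com/teryfly/CodeFileExecutorLib | src/core/parser.py | validate_task_structure
-- ===== SOURCE A (Python) =====
-- from typing import List, Tuple
--
-- def validate_task_structure(lines: List[str]) -> Tuple[bool, str, str, str]:
--     """
--     验证任务结构有效性，返回 (有效, step_line, action_line, file_path_line)
--     """
--     step = action = path = None
--     for line in lines:
--         if line.strip().startswith("Step"):
--             step = line.strip()
--         elif line.strip().startswith("Action:"):
--             action = line.strip()
--         elif line.strip().startswith("File Path:"):
--             path = line.strip()
--     valid = bool(step and action and path)
--     return (valid, step or "", action or "", path or "")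
-- ===== SOURCE B (Python) =====
-- def validate_task_structure(lines):
--     """
--     验证任务结构有效性，返回 (有效, step_line, action_line, file_path_line)
--     Staged decomposition: strip once, then three independent scans, each taking
--     the first match from the end (= last match from the front) for its marker.
--     """
--     stripped = [line.strip() for line in lines]
--
--     def last_with(prefix):
--         return next((s for s in reversed(stripped) if s.startswith(prefix)), None)
--
--     step = last_with("Step")
--     action = last_with("Action:")
--     path = last_with("File Path:")
--     valid = step is not None and action is not None and path is not None
--     return (valid, step or "", action or "", path or "")
-- ===== Notes on version B (the rewrite author's own statement) =====
-- stated objective: alternative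
-- what changed: Replaces the single accumulator loop (last-match overwrite of three variables with elif chaining) by a staged decomposition: strip all lines once, then run three independent reverse scans, each returning the first match from the end for its own marker.
import Mathlib
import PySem

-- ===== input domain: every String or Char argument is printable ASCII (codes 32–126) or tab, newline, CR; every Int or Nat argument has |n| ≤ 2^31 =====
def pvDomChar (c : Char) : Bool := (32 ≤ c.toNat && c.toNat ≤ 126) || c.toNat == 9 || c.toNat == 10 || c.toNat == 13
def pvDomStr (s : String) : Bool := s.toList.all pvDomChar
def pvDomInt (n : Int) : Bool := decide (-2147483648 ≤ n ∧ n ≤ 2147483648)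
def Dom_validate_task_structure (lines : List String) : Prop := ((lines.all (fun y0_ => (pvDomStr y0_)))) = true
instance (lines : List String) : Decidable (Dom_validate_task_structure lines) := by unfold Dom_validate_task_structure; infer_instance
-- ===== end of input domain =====

-- B strips every line once and runs three independent reverse scans (first match from the end per marker) instead of A's single elif-chained accumulator loop; alternative decomposition, same O(n) cost.

-- ===== PORT A =====
-- one iteration of A's loop: elif chain, last match per category overwrites
def vtsUpd (st : Option String × Option String × Option String) (line : String) :
    Option String × Option String × Option String :=
  if PySem.Str.startswith (PySem.Str.strip line) "Step" then
    (some (PySem.Str.strip line), st.2.1, st.2.2)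
  else if PySem.Str.startswith (PySem.Str.strip line) "Action:" then
    (st.1, some (PySem.Str.strip line), st.2.2)
  else if PySem.Str.startswith (PySem.Str.strip line) "File Path:" then
    (st.1, st.2.1, some (PySem.Str.strip line))
  else st

def validate_task_structure (lines : List String) : Bool × String × String × String :=
  let st := lines.foldl vtsUpd (none, none, none)
  -- `bool(step and action and path)`: any stored string starts with a nonempty marker, hence
  -- is nonempty, so Python's truthiness is exactly `isSome`; `x or ""` is `getD ""`.
  (st.1.isSome && st.2.1.isSome && st.2.2.isSome, st.1.getD "", st.2.1.getD "", st.2.2.getD "")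

-- ===== PORT B =====
-- `next((s for s in rs if s.startswith(prefix)), None)`: first match in the given list
def vtsLast (pre : String) : List String → Option String
  | [] => none
  | s :: rest => if PySem.Str.startswith s pre then some s else vtsLast pre rest

def validate_task_structure_alt (lines : List String) : Bool × String × String × String :=
  let stripped := lines.map PySem.Str.strip
  let step := vtsLast "Step" stripped.reverse
  let action := vtsLast "Action:" stripped.reverse
  let path := vtsLast "File Path:" stripped.reverse
  -- same truthiness note as in port A
  (step.isSome && action.isSome && path.isSome, step.getD "", action.getD "", path.getD "")

-- ===== PRECONDITION & SPEC =====
def Spec_validate_task_structure (lines : List String) (out : Bool × String × String × String) : Prop := out = validate_task_structure_alt lines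
instance (lines : List String) (out : Bool × String × String × String) : Decidable (Spec_validate_task_structure lines out) := by unfold Spec_validate_task_structure; infer_instance

-- ===== CLAIM (what is proved, stated in full; the proofs are below) =====
def Claim_equal_validate_task_structure : Prop := ∀ (lines : List String), Dom_validate_task_structure lines → Spec_validate_task_structure lines (validate_task_structure lines)

-- ===== LEMMAS AND PROOFS =====

-- the three markers are mutually exclusive prefixes (distinct first characters)
lemma vts_excl {t p q : String} (hph : p.toList.head? ≠ q.toList.head?)
    (hp : p.toList ≠ []) (hq : q.toList ≠ [])
    (h : PySem.Str.startswith t p = true) :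
    PySem.Str.startswith t q = false := by
  by_contra hQb
  rw [Bool.not_eq_false] at hQb
  simp only [PySem.Str.startswith_eq, PySem.Chars.startswith_iff] at h hQb
  obtain ⟨r1, e1⟩ := h
  obtain ⟨r2, e2⟩ := hQb
  cases hP : p.toList with
  | nil => exact hp hP
  | cons c cs =>
    cases hQ : q.toList with
    | nil => exact hq hQ
    | cons d ds =>
      rw [hP] at e1; rw [hQ] at e2
      have e3 : c :: (cs ++ r1) = d :: (ds ++ r2) := by
        rw [List.cons_append] at e1 e2
        rw [e1, e2]
      injection e3 with h1 _
      apply hph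
      rw [hP, hQ]
      simp [h1]

lemma excl_SA {t : String} (h : PySem.Str.startswith t "Step" = true) :
    PySem.Str.startswith t "Action:" = false := vts_excl (by decide) (by decide) (by decide) h
lemma excl_SP {t : String} (h : PySem.Str.startswith t "Step" = true) :
    PySem.Str.startswith t "File Path:" = false := vts_excl (by decide) (by decide) (by decide) h
lemma excl_AP {t : String} (h : PySem.Str.startswith t "Action:" = true) :
    PySem.Str.startswith t "File Path:" = false := vts_excl (by decide) (by decide) (by decide) h

-- A's fold computes, componentwise, the last matching stripped line of each marker
lemma fold_eq_lasts (ls : List String) :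
    ls.foldl vtsUpd (none, none, none) =
      (vtsLast "Step" (ls.map PySem.Str.strip).reverse,
       vtsLast "Action:" (ls.map PySem.Str.strip).reverse,
       vtsLast "File Path:" (ls.map PySem.Str.strip).reverse) := by
  induction ls using List.reverseRecOn with
  | nil => rfl
  | append_singleton ys x ih =>
    rw [List.foldl_append, List.foldl_cons, List.foldl_nil, ih,
      List.map_append, List.reverse_append]
    simp only [List.map_cons, List.map_nil, List.reverse_cons, List.reverse_nil,
      List.nil_append, List.singleton_append, vtsLast]
    by_cases hS : PySem.Str.startswith (PySem.Str.strip x) "Step" = true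
    · have hA := excl_SA hS
      have hP := excl_SP hS
      simp at hS hA hP
      simp [vtsUpd, hS, hA, hP]
    · by_cases hA : PySem.Str.startswith (PySem.Str.strip x) "Action:" = true
      · have hP := excl_AP hA
        simp at hS hA hP
        simp [vtsUpd, hS, hA, hP]
      · by_cases hP : PySem.Str.startswith (PySem.Str.strip x) "File Path:" = true <;>
          simp at hS hA hP <;>
          simp [vtsUpd, hS, hA, hP]

-- ===== VERDICT (by name: the statement is the Claim_ definition above) =====
theorem validate_task_structure_spec : Claim_equal_validate_task_structure := by
  intro lines _
  unfold Spec_validate_task_structure validate_task_structure validate_task_structure_alt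
  rw [fold_eq_lasts]
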